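-- pv_equiv track=rewrite | github.com/yhaiqiang/Langchain-Chatchat | server/knowledge_base/bm25.py | calculate_doc_frequencies
-- ===== SOURCE A (Python) =====
-- def calculate_doc_frequencies(documents):
--     doc_frequencies = {}
--     for doc in documents:
--         words = doc.split()
--         for word in words:
--             if word in doc_frequencies:
--                 doc_frequencies[word] += 1
--             else:
--                 doc_frequencies[word] = 1
--     return doc_frequencies
-- ===== SOURCE B (Python) =====
-- def calculate_doc_frequencies(documents):
--     words = [w for doc in documents for w in doc.split()]
--     return {w: words.count(w) for w in dict.fromkeys(words)}
-- ===== Notes on version B (the rewrite author's own statement) =====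
-- stated objective: alternative
-- what changed: B flattens all tokens into one list, deduplicates it preserving first occurrences, and builds the result by counting each distinct word in the flat list, instead of A's nested loops maintaining a running dict with a membership branch.
import Mathlib
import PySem

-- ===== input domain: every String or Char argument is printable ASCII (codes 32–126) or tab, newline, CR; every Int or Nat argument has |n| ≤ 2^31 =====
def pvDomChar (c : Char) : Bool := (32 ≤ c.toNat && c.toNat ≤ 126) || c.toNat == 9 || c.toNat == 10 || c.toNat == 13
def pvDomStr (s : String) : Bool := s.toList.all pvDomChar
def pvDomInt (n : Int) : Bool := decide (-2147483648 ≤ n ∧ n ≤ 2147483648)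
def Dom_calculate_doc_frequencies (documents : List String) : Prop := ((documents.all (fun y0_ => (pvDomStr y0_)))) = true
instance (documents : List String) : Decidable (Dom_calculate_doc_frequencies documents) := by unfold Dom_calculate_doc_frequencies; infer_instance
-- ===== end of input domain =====

-- B flattens all tokens, deduplicates preserving first occurrences, and counts each distinct word in the flat list (alternative decomposition; no speed claim).


-- ===== PORT A =====
def calculate_doc_frequencies (documents : List String) : List (String × Int) :=
  (documents.foldl (fun d doc =>
      (PySem.Str.split₀ doc).foldl (fun d word =>
        if d.contains word then d.insert word (d.getD word 0 + 1)
        else d.insert word 1) d)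
    PySem.Dict.empty).items

-- ===== PORT B =====
def calculate_doc_frequencies_alt (documents : List String) : List (String × Int) :=
  let words := documents.flatMap (fun doc => PySem.Str.split₀ doc)
  (PySem.List.dedup words).map (fun w => (w, (words.count w : Int)))

-- ===== PRECONDITION & SPEC =====
def Spec_calculate_doc_frequencies (documents : List String) (out : List (String × Int)) : Prop := out = calculate_doc_frequencies_alt documents
instance (documents : List String) (out : List (String × Int)) : Decidable (Spec_calculate_doc_frequencies documents out) := by unfold Spec_calculate_doc_frequencies; infer_instance

-- ===== CLAIM (what is proved, stated in full; the proofs are below) =====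
def Claim_equal_calculate_doc_frequencies : Prop := ∀ (documents : List String), Dom_calculate_doc_frequencies documents → Spec_calculate_doc_frequencies documents (calculate_doc_frequencies documents)

-- ===== LEMMAS AND PROOFS =====

lemma cdf_step (d : PySem.Dict String Int) (w : String) :
    (if d.contains w then d.insert w (d.getD w 0 + 1) else d.insert w 1)
      = d.insert w (d.getD w 0 + 1) := by
  by_cases h : d.contains w = true
  · simp [h]
  · simp only [Bool.not_eq_true] at h
    rw [PySem.Dict.getD_of_not_contains (h := h)]
    simp [h]

lemma cdf_dict_eq (documents : List String) (d : PySem.Dict String Int) :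
    documents.foldl (fun d doc =>
      (PySem.Str.split₀ doc).foldl (fun d word =>
        if d.contains word then d.insert word (d.getD word 0 + 1)
        else d.insert word 1) d) d
    = (documents.flatMap (fun doc => PySem.Str.split₀ doc)).foldl
        (fun d w => d.insert w (d.getD w 0 + 1)) d := by
  induction documents generalizing d with
  | nil => rfl
  | cons doc rest ih =>
    simp only [List.foldl_cons, List.flatMap_cons, List.foldl_append, ih]
    congr 1
    exact PySem.List.foldl_congr_mem _ _ _ _ (fun d w _ => cdf_step d w)

-- ===== VERDICT (by name: the statement is the Claim_ definition above) =====
theorem calculate_doc_frequencies_spec : Claim_equal_calculate_doc_frequencies := by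
  intro documents _
  unfold Spec_calculate_doc_frequencies calculate_doc_frequencies calculate_doc_frequencies_alt
  rw [cdf_dict_eq, PySem.Dict.foldl_insert_getD_add_one_eq_counter, PySem.Dict.items_counter]
  simp
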